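-- pv_equiv track=rewrite | github.com/jimnorac/CTAT-BI | CTAT_BI_Functions.py | get_alpha
-- ===== SOURCE A (Python) =====
-- def get_alpha(zIn):
--   z=1
--   zOut = zIn[0]
--   while z < len(zIn):
--     if(zIn[z] != '0' and zIn[z] !='1' and zIn[z] !='2' and zIn[z] !='3'and zIn[z] !='4'and zIn[z] !='5'and zIn[z] !='6'and zIn[z] !='7'and zIn[z] !='8'and zIn[z] !='9'):
--       zOut  = zOut +zIn[z]
--       z=z+1
--     else:
--       z=len(zIn)
--   return zOut
-- ===== SOURCE B (Python) =====
-- def get_alpha(zIn):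
--     for i in range(1, len(zIn)):
--         if zIn[i] in '0123456789':
--             return zIn[:i]
--     return zIn
-- ===== Notes on version B (the rewrite author's own statement) =====
-- stated objective: faster
-- what changed: Instead of growing the result character by character with zOut = zOut + zIn[z] (quadratic string concatenation) guarded by nine chained != tests, B scans for the index of the first digit after position 0 with a single membership test and returns the slice zIn[:i] (or zIn itself if none).
import Mathlib
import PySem

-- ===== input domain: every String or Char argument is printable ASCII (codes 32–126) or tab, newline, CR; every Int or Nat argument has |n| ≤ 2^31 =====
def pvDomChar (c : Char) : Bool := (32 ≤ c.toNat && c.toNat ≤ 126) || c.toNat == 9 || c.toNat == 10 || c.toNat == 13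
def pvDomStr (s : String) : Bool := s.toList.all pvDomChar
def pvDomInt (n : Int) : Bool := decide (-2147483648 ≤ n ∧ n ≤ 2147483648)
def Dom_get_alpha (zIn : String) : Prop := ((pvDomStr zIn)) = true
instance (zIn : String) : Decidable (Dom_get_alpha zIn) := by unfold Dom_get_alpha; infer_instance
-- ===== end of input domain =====

-- B replaces A's character-by-character accumulator (repeated string concatenation,
-- nine chained ≠ tests) by a scan for the first digit index and a single slice.


-- ===== PORT A =====
-- while z < len(zIn): append non-digit chars to zOut, stop at first digit
def getAlphaLoopA : List Char → List Char → List Char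
  | [], zOut => zOut
  | c :: rest, zOut =>
    if c ≠ '0' ∧ c ≠ '1' ∧ c ≠ '2' ∧ c ≠ '3' ∧ c ≠ '4' ∧ c ≠ '5' ∧ c ≠ '6' ∧ c ≠ '7' ∧ c ≠ '8' ∧ c ≠ '9' then
      getAlphaLoopA rest (zOut ++ [c])
    else zOut

def get_alpha (zIn : String) : String :=
  match zIn.toList with
  | [] => ""   -- Python raises IndexError on zIn[0]; excluded by Pre_get_alpha
  | c :: rest => String.ofList (getAlphaLoopA rest [c])

-- ===== PORT B =====
-- for i in range(1, len(zIn)): if zIn[i] in '0123456789': return zIn[:i]; return zIn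
def getAlphaScanB (cs : List Char) (i : Nat) : List Char :=
  if h : i < cs.length then
    if cs[i] ∈ ['0','1','2','3','4','5','6','7','8','9'] then cs.take i
    else getAlphaScanB cs (i + 1)
  else cs
termination_by cs.length - i

def get_alpha_alt (zIn : String) : String := String.ofList (getAlphaScanB zIn.toList 1)

-- ===== PRECONDITION & SPEC =====
-- Pre_ excludes only the empty string, on which A raises IndexError at zIn[0].
def Pre_get_alpha (zIn : String) : Prop := zIn ≠ ""
instance (zIn : String) : Decidable (Pre_get_alpha zIn) := by unfold Pre_get_alpha; infer_instance
def pvWitness_get_alpha : String := "ab12"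

def Spec_get_alpha (zIn : String) (out : String) : Prop := out = get_alpha_alt zIn
instance (zIn : String) (out : String) : Decidable (Spec_get_alpha zIn out) := by unfold Spec_get_alpha; infer_instance

-- ===== CLAIM (what is proved, stated in full; the proofs are below) =====
def Claim_equal_get_alpha : Prop := ∀ (zIn : String), Dom_get_alpha zIn → Pre_get_alpha zIn → Spec_get_alpha zIn (get_alpha zIn)

-- ===== LEMMAS AND PROOFS =====
-- shared predicate: "is not one of the ten ASCII digits"
def pvND (c : Char) : Bool :=
  decide (c ≠ '0' ∧ c ≠ '1' ∧ c ≠ '2' ∧ c ≠ '3' ∧ c ≠ '4' ∧ c ≠ '5' ∧ c ≠ '6' ∧ c ≠ '7' ∧ c ≠ '8' ∧ c ≠ '9')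

theorem loopA_eq (l : List Char) : ∀ zOut, getAlphaLoopA l zOut = zOut ++ l.takeWhile pvND := by
  induction l with
  | nil => intro zOut; simp [getAlphaLoopA]
  | cons c rest ih =>
    intro zOut
    by_cases h : c ≠ '0' ∧ c ≠ '1' ∧ c ≠ '2' ∧ c ≠ '3' ∧ c ≠ '4' ∧ c ≠ '5' ∧ c ≠ '6' ∧ c ≠ '7' ∧ c ≠ '8' ∧ c ≠ '9'
    · simp [getAlphaLoopA, h, ih, pvND]
    · simp [getAlphaLoopA, h, pvND]

theorem mem_digits_iff (c : Char) :
    c ∈ (['0','1','2','3','4','5','6','7','8','9'] : List Char) ↔ pvND c = false := by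
  simp [pvND, List.mem_cons]
  tauto

theorem scanB_eq (cs : List Char) (i : Nat) :
    getAlphaScanB cs i = cs.take i ++ (cs.drop i).takeWhile pvND := by
  by_cases h : i < cs.length
  · have hdrop : cs.drop i = cs[i] :: cs.drop (i + 1) := List.drop_eq_getElem_cons h
    by_cases hd : cs[i] ∈ (['0','1','2','3','4','5','6','7','8','9'] : List Char)
    · have hnd : pvND cs[i] = false := (mem_digits_iff _).mp hd
      rw [getAlphaScanB, dif_pos h, if_pos hd, hdrop, List.takeWhile_cons, hnd]
      simp
    · have hnd : pvND cs[i] = true := by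
        cases hv : pvND cs[i]
        · exact absurd ((mem_digits_iff _).mpr hv) hd
        · rfl
      rw [getAlphaScanB, dif_pos h, if_neg hd, scanB_eq cs (i + 1), hdrop,
          List.takeWhile_cons, hnd]
      simp only [List.take_add_one, List.getElem?_eq_getElem h, Option.toList_some,
                 List.append_assoc, List.singleton_append, if_true]
  · rw [getAlphaScanB, dif_neg h,
        List.take_of_length_le (Nat.le_of_not_lt h), List.drop_of_length_le (Nat.le_of_not_lt h)]
    simp
termination_by cs.length - i

-- ===== VERDICT (by name: the statement is the Claim_ definition above) =====
theorem get_alpha_spec : Claim_equal_get_alpha := by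
  intro zIn _ hpre
  unfold Spec_get_alpha get_alpha get_alpha_alt
  have hne : zIn.toList ≠ [] := fun h => hpre (String.toList_eq_nil_iff.mp h)
  cases hcs : zIn.toList with
  | nil => exact absurd hcs hne
  | cons c rest =>
    show String.ofList (getAlphaLoopA rest [c]) = String.ofList (getAlphaScanB (c :: rest) 1)
    rw [loopA_eq, scanB_eq]
    simp
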